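-- pv_equiv track=rewrite | github.com/hmessas/Forca2.0 | Forca.py | checking_letters
-- ===== SOURCE A (Python) =====
-- def checking_letters(palavra,lg):
--     cr=['_']*len(palavra)
--     erros = 0
--     for i in lg:
--         if i in palavra:
--             for x in range(len(palavra)):
--                 if palavra[x] == i:
--                     cr[x]=i
--
--         else:
--             erros+=1
--     return ''.join(cr), erros
-- ===== SOURCE B (Python) =====
-- def checking_letters(palavra, lg):
--     revealed = ''.join(c if c in lg else '_' for c in palavra)
--     erros = sum(1 for i in lg if i not in palavra)
--     return revealed, erros
-- ===== Notes on version B (the rewrite author's own statement) =====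
-- stated objective: simpler
-- what changed: Replaced the guess-outer loop that mutates a '_' array via an inner index scan with a single word-driven comprehension revealing each letter, plus an independent one-line count of wrong guesses.
import Mathlib
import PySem

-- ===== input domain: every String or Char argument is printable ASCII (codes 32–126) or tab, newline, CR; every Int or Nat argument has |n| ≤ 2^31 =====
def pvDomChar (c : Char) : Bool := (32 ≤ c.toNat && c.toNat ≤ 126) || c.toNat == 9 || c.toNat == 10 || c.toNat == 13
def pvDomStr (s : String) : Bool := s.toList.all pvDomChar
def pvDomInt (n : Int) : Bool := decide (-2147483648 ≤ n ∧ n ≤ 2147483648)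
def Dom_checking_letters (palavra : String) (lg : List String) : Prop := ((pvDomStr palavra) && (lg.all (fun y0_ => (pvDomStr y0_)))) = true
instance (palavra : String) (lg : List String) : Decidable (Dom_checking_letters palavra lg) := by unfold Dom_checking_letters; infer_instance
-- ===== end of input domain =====

-- B replaces A's guess-outer/index-inner mutation of a '_' array by a single word-driven
-- reveal pass plus an independent count of wrong guesses (objective: simpler).

-- ===== PORT A =====
-- cr=['_']*len(palavra); for i in lg: if i in palavra (substring): for x in range(len): if palavra[x]==i: cr[x]=i; else erros+=1
def checking_letters (palavra : String) (lg : List String) : String × Int :=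
  let chars := palavra.toList
  let res := lg.foldl (fun (st : List String × Int) i =>
      if PySem.Str.isIn i palavra then
        ((List.range chars.length).foldl
          (fun cr x => if String.ofList [chars.getD x ' '] == i then cr.set x i else cr) st.1,
         st.2)
      else (st.1, st.2 + 1))
    (List.replicate chars.length "_", 0)
  (String.join res.1, res.2)

-- ===== PORT B =====
-- revealed = ''.join(c if c in lg else '_' for c in palavra); erros = sum(1 for i in lg if i not in palavra)
def checking_letters_alt (palavra : String) (lg : List String) : String × Int :=
  (String.ofList (palavra.toList.map (fun c => if String.ofList [c] ∈ lg then c else '_')),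
   ((lg.filter (fun i => !PySem.Str.isIn i palavra)).length : Int))

-- ===== PRECONDITION & SPEC =====
def Spec_checking_letters (palavra : String) (lg : List String) (out : String × Int) : Prop := out = checking_letters_alt palavra lg
instance (palavra : String) (lg : List String) (out : String × Int) : Decidable (Spec_checking_letters palavra lg out) := by unfold Spec_checking_letters; infer_instance

-- ===== CLAIM (what is proved, stated in full; the proofs are below) =====
def Claim_equal_checking_letters : Prop := ∀ (palavra : String) (lg : List String), Dom_checking_letters palavra lg → Spec_checking_letters palavra lg (checking_letters palavra lg)

-- ===== LEMMAS AND PROOFS =====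

-- a single char of the word, as a string, is a substring of the word
lemma singleton_isIn {c : Char} {palavra : String} (h : c ∈ palavra.toList) :
    PySem.Str.isIn (String.ofList [c]) palavra = true := by
  rw [PySem.Str.isIn_iff_infix]
  obtain ⟨s, t, ht⟩ := List.append_of_mem h
  exact ⟨s, t, by simp [ht]⟩

-- the inner index loop preserves the length of cr
lemma setfold_length (f : Nat → Bool) (v : String) :
    ∀ (l : List Nat) (cr : List String),
      (l.foldl (fun cr x => if f x then cr.set x v else cr) cr).length = cr.length := by
  intro l
  induction l with
  | nil => intro cr; rfl
  | cons x xs ih =>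
    intro cr
    simp only [List.foldl_cons]
    rw [ih]
    split <;> simp

-- pointwise description of the inner index loop
lemma setfold_get? (f : Nat → Bool) (v : String) :
    ∀ (l : List Nat) (cr : List String), (∀ x ∈ l, x < cr.length) → ∀ j,
      (l.foldl (fun cr x => if f x then cr.set x v else cr) cr)[j]?
        = if j ∈ l ∧ f j = true then some v else cr[j]? := by
  intro l
  induction l with
  | nil => intro cr _ j; simp
  | cons x xs ih =>
    intro cr hlt j
    have hx : x < cr.length := hlt x (by simp)
    simp only [List.foldl_cons]
    rw [ih _ (by intro y hy; split <;> simpa using hlt y (by simp [hy]))]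
    by_cases hmem : j ∈ xs ∧ f j = true
    · simp [hmem]
    · simp only [if_neg hmem]
      by_cases hfx : f x = true
      · simp only [if_pos hfx]
        rw [List.getElem?_set]
        by_cases hjx : x = j
        · subst hjx
          simp [hx, hfx]
        · have hthis : ¬ (j ∈ x :: xs ∧ f j = true) := by
            rintro ⟨hm, hf⟩
            rcases List.mem_cons.mp hm with h | h
            · exact hjx h.symm
            · exact hmem ⟨h, hf⟩
          rw [if_neg hjx, if_neg hthis]
      · have hthis : ¬ (j ∈ x :: xs ∧ f j = true) := by
          rintro ⟨hm, hf⟩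
          rcases List.mem_cons.mp hm with h | h
          · subst h; exact hfx hf
          · exact hmem ⟨h, hf⟩
        rw [if_neg hfx, if_neg hthis]

-- full description of A's outer loop
lemma outer_fold (palavra : String) :
    ∀ (lg : List String) (cr : List String) (e : Int), cr.length = palavra.toList.length →
      (lg.foldl (fun (st : List String × Int) i =>
          if PySem.Str.isIn i palavra then
            ((List.range palavra.toList.length).foldl
              (fun cr x => if String.ofList [palavra.toList.getD x ' '] == i then cr.set x i else cr) st.1,
             st.2)
          else (st.1, st.2 + 1)) (cr, e)).2
        = e + ((lg.filter (fun i => !PySem.Str.isIn i palavra)).length : Int)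
      ∧ (lg.foldl (fun (st : List String × Int) i =>
          if PySem.Str.isIn i palavra then
            ((List.range palavra.toList.length).foldl
              (fun cr x => if String.ofList [palavra.toList.getD x ' '] == i then cr.set x i else cr) st.1,
             st.2)
          else (st.1, st.2 + 1)) (cr, e)).1.length = cr.length
      ∧ ∀ j, ((lg.foldl (fun (st : List String × Int) i =>
          if PySem.Str.isIn i palavra then
            ((List.range palavra.toList.length).foldl
              (fun cr x => if String.ofList [palavra.toList.getD x ' '] == i then cr.set x i else cr) st.1,
             st.2)
          else (st.1, st.2 + 1)) (cr, e)).1)[j]?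
        = if j < palavra.toList.length ∧ String.ofList [palavra.toList.getD j ' '] ∈ lg
          then some (String.ofList [palavra.toList.getD j ' ']) else cr[j]? := by
  intro lg
  induction lg with
  | nil => intro cr e h; refine ⟨by simp, rfl, by simp⟩
  | cons i rest ih =>
    intro cr e h
    simp only [List.foldl_cons]
    by_cases hin : PySem.Str.isIn i palavra = true
    · simp only [if_pos hin]
      set cr' := (List.range palavra.toList.length).foldl
          (fun cr x => if String.ofList [palavra.toList.getD x ' '] == i then cr.set x i else cr) cr with hcr'
      have hlen' : cr'.length = palavra.toList.length := by
        rw [hcr', setfold_length]; exact h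
      obtain ⟨h2, h1len, h1⟩ := ih cr' e hlen'
      refine ⟨?_, by rw [h1len, hlen', h], ?_⟩
      · rw [h2]
        have hflt : List.filter (fun i => !PySem.Str.isIn i palavra) (i :: rest)
            = List.filter (fun i => !PySem.Str.isIn i palavra) rest := by
          rw [List.filter_cons, if_neg (by rw [hin]; decide)]
        rw [hflt]
      · intro j
        rw [h1, hcr',
          setfold_get? _ _ _ cr (by intro x hx; rw [h]; simpa using hx) j]
        by_cases hr : j < palavra.toList.length ∧ String.ofList [palavra.toList.getD j ' '] ∈ rest
        · rw [if_pos hr, if_pos ⟨hr.1, List.mem_cons.mpr (Or.inr hr.2)⟩]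
        · rw [if_neg hr]
          by_cases hji : j < palavra.toList.length ∧ String.ofList [palavra.toList.getD j ' '] = i
          · rw [if_pos ⟨List.mem_range.mpr hji.1, beq_iff_eq.mpr hji.2⟩,
              if_pos ⟨hji.1, List.mem_cons.mpr (Or.inl hji.2)⟩, hji.2]
          · rw [if_neg (fun hc => hji ⟨List.mem_range.mp hc.1, beq_iff_eq.mp hc.2⟩),
              if_neg (fun hc => (List.mem_cons.mp hc.2).elim
                (fun hh => hji ⟨hc.1, hh⟩) (fun hh => hr ⟨hc.1, hh⟩))]
    · simp only [if_neg hin]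
      obtain ⟨h2, h1len, h1⟩ := ih cr (e + 1) h
      refine ⟨?_, h1len, ?_⟩
      · rw [h2]
        have hflt : List.filter (fun i => !PySem.Str.isIn i palavra) (i :: rest)
            = i :: List.filter (fun i => !PySem.Str.isIn i palavra) rest := by
          rw [List.filter_cons, if_pos (by rw [eq_false_of_ne_true hin]; decide)]
        rw [hflt, List.length_cons]
        push_cast
        ring
      · intro j
        rw [h1]
        by_cases hr : j < palavra.toList.length ∧ String.ofList [palavra.toList.getD j ' '] ∈ rest
        · rw [if_pos hr, if_pos ⟨hr.1, List.mem_cons.mpr (Or.inr hr.2)⟩]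
        · rw [if_neg hr]
          have hnot2 : ¬ (j < palavra.toList.length ∧
              String.ofList [palavra.toList.getD j ' '] ∈ i :: rest) := by
            rintro ⟨hl, hm⟩
            rcases List.mem_cons.mp hm with hh | hh
            · have hc : palavra.toList.getD j ' ' ∈ palavra.toList := by
                rw [List.getD_eq_getElem?_getD, List.getElem?_eq_getElem hl]
                exact List.getElem_mem hl
              -- wrong guesses are never single letters of the word
              have hii := singleton_isIn hc
              rw [hh] at hii
              exact hin hii
            · exact hr ⟨hl, hh⟩
          rw [if_neg hnot2]

-- joining one-character strings rebuilds the word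
lemma join_singletons (l : List Char) :
    String.join (l.map (fun c => String.ofList [c])) = String.ofList l := by
  apply String.toList_injective
  rw [String.toList_join]
  simp only [List.map_map, Function.comp_def, String.toList_ofList]
  induction l with
  | nil => rfl
  | cons c cs ih => simpa using ih

-- ===== VERDICT (by name: the statement is the Claim_ definition above) =====
theorem checking_letters_spec : Claim_equal_checking_letters := by
  intro palavra lg _
  unfold Spec_checking_letters checking_letters checking_letters_alt
  obtain ⟨h2, h1len, h1⟩ := outer_fold palavra lg
      (List.replicate palavra.toList.length "_") 0 (by simp)
  refine Prod.ext ?_ (by simpa using h2)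
  have hlist : (lg.foldl (fun (st : List String × Int) i =>
      if PySem.Str.isIn i palavra then
        ((List.range palavra.toList.length).foldl
          (fun cr x => if String.ofList [palavra.toList.getD x ' '] == i then cr.set x i else cr) st.1,
         st.2)
      else (st.1, st.2 + 1)) (List.replicate palavra.toList.length "_", 0)).1
      = palavra.toList.map (fun c => String.ofList [if String.ofList [c] ∈ lg then c else '_']) := by
    apply List.ext_getElem?
    intro j
    rw [h1 j]
    by_cases hj : j < palavra.toList.length
    · have hget : palavra.toList.getD j ' ' = palavra.toList[j] := by
        rw [List.getD_eq_getElem?_getD, List.getElem?_eq_getElem hj]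
        rfl
      have hmap : (palavra.toList.map
          (fun c => String.ofList [if String.ofList [c] ∈ lg then c else '_']))[j]?
          = some (String.ofList [if String.ofList [palavra.toList[j]] ∈ lg
              then palavra.toList[j] else '_']) := by
        rw [List.getElem?_eq_getElem (by simpa using hj)]
        simp
      rw [hmap]
      by_cases hm : String.ofList [palavra.toList.getD j ' '] ∈ lg
      · rw [if_pos ⟨hj, hm⟩, hget]
        rw [hget] at hm
        rw [if_pos hm]
      · rw [if_neg (by rintro ⟨_, hmm⟩; exact hm hmm)]
        rw [hget] at hm
        rw [if_neg hm]
        rw [List.getElem?_eq_getElem (by simpa using hj)]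
        simp [List.getElem_replicate]
    · rw [if_neg (by rintro ⟨hl, _⟩; exact hj hl)]
      rw [List.getElem?_eq_none (by simpa using le_of_not_gt hj),
        List.getElem?_eq_none (by simpa using le_of_not_gt hj)]
  simp only [hlist]
  have hmap : palavra.toList.map (fun c => String.ofList [if String.ofList [c] ∈ lg then c else '_'])
      = (palavra.toList.map (fun c => if String.ofList [c] ∈ lg then c else '_')).map
          (fun c => String.ofList [c]) := by
    simp [List.map_map]
  rw [hmap, join_singletons]
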